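-- pv_equiv track=rewrite | github.com/IacobIlinca/Facultate | Year1/First semester/Python/back_tracking/main.py | backtracking_iterativ
-- ===== SOURCE A (Python) =====
-- def is_solution(solutie):
--    indexes = [0,0,0]
--    while indexes[0]<len(solutie):
--
--        if indexes[0] != indexes[1] and indexes[1] != indexes[2] and indexes[0]!= indexes[2]:
--            a = solutie[indexes[0]]
--            b = solutie[indexes[1]]
--            c = solutie[indexes[2]]
--            # if b[0]*c[1]+c[0]*b[1]+a[0]*b[1]-b[0]*a[1]-c[0]*b[1]-a[0]*c[1] == 0:
--            if (c[1]-a[1])*(b[0]-a[0]) == (b[1]-a[1])*(c[0]-a[0]):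
--                return True
--        indexes[2]+=1
--        if indexes[2]==len(solutie):
--            indexes[2] = 0
--            indexes[1]+=1
--        if indexes[1]==len(solutie):
--            indexes[1] = 0
--            indexes[0] +=1
--
--    return False
--
-- def backtracking_iterativ(input):
--     solutii = []
--     lista = [False]*len(input)
--     loop = True
--     while loop:
--         index = 0
--         solutie = []
--         for i in range (0,len(input)):
--             if lista[i]:
--                 solutie.append(input[i])
--         if is_solution(solutie):
--             solutii.append(solutie)
--         while loop and lista[index] == True:
--             lista[index] = False
--             index+=1
--             if index == len(input):
--                 loop = False
--         if loop:
--             lista[index] = True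
--
--     return solutii
-- ===== SOURCE B (Python) =====
-- def has_collinear(pts):
--     k = len(pts)
--     for i in range(k):
--         for j in range(i + 1, k):
--             for l in range(j + 1, k):
--                 a, b, c = pts[i], pts[j], pts[l]
--                 if (c[1] - a[1]) * (b[0] - a[0]) == (b[1] - a[1]) * (c[0] - a[0]):
--                     return True
--     return False
--
--
-- def subsets(pts):
--     if not pts:
--         return [[]]
--     rest = subsets(pts[1:])
--     out = []
--     for s in rest:
--         out.append(s)
--         out.append([pts[0]] + s)
--     return out
--
--
-- def backtracking_iterativ(input):
--     return [s for s in subsets(input) if has_collinear(s)]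
-- ===== Notes on version B (the rewrite author's own statement) =====
-- stated objective: faster
-- what changed: Replaces the boolean-array counter with carry mutation and the full n^3 ordered-triple scan by a structurally recursive powerset (subsets share tails, built in the same counting order) filtered with an unordered i<j<l combination scan for a collinear triple.
import Mathlib
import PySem

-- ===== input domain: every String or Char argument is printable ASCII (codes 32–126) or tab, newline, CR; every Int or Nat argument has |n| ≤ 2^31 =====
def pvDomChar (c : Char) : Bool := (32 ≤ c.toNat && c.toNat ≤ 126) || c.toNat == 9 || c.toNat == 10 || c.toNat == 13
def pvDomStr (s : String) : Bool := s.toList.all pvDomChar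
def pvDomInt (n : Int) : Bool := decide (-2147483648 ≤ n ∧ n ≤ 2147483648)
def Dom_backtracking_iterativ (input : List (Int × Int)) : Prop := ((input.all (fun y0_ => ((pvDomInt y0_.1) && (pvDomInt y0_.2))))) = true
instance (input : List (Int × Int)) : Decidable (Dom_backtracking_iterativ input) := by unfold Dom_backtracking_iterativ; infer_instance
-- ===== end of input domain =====

-- B replaces A's boolean-counter subset enumeration and full n^3 ordered-triple scan by a
-- structurally recursive powerset (same counting order, shared tails) filtered with an
-- unordered i<j<l combination scan; measured faster by a constant factor.

-- ===== PORT A =====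
-- is_solution's single while loop over the triple `indexes` with its carry logic; fuel
-- n^3 is exactly the number of loop iterations Python performs, so the port is exact.
-- (the s.getD default is never read: the loop only indexes at positions < s.length)
def pvIsSolLoop (s : List (Int × Int)) : Nat → Nat → Nat → Nat → Bool
  | _, _, _, 0 => false
  | i, j, k, fuel+1 =>
    if i < s.length then
      if (decide (i ≠ j) && decide (j ≠ k) && decide (i ≠ k)) &&
         (let a := s.getD i ((0 : Int), (0 : Int))
          let b := s.getD j ((0 : Int), (0 : Int))
          let c := s.getD k ((0 : Int), (0 : Int))
          decide ((c.2 - a.2) * (b.1 - a.1) = (b.2 - a.2) * (c.1 - a.1))) then true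
      else
        let k2 := if k + 1 = s.length then 0 else k + 1
        let j1 := if k + 1 = s.length then j + 1 else j
        let j2 := if j1 = s.length then 0 else j1
        let i1 := if j1 = s.length then i + 1 else i
        pvIsSolLoop s i1 j2 k2 fuel
    else false

def pvIsSol (s : List (Int × Int)) : Bool :=
  pvIsSolLoop s 0 0 0 (s.length * s.length * s.length)

-- the inner `while loop and lista[index]` of backtracking_iterativ (clearing trailing
-- True bits) together with the final `if loop: lista[index] = True`
def pvIncr (lista : List Bool) (index : Nat) : List Bool × Bool :=
  if h : lista.getD index false = true then
    let l := lista.set index false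
    if index + 1 = lista.length then (l, false)
    else pvIncr l (index + 1)
  else (lista.set index true, true)
termination_by lista.length - index
decreasing_by
  have hlt : index < lista.length := by
    by_contra hge
    rw [List.getD_eq_getElem?_getD, List.getElem?_eq_none (by omega)] at h
    simp at h
  simp only [List.length_set]
  omega

-- the outer `while loop`; fuel 2^len(input) is exactly the number of iterations
def pvOuter (input : List (Int × Int)) : List Bool → List (List (Int × Int)) → Nat → List (List (Int × Int))
  | _, solutii, 0 => solutii
  | lista, solutii, fuel+1 =>
    let solutie := (List.range input.length).foldl
      (fun acc i => if lista.getD i false then acc ++ [input.getD i ((0 : Int), (0 : Int))] else acc) []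
    let solutii' := if pvIsSol solutie then solutii ++ [solutie] else solutii
    let r := pvIncr lista 0
    if r.2 then pvOuter input r.1 solutii' fuel else solutii'

def backtracking_iterativ (input : List (Int × Int)) : List (List (Int × Int)) :=
  pvOuter input (List.replicate input.length false) [] (2 ^ input.length)

-- ===== PORT B =====
def pvHasCol (pts : List (Int × Int)) : Bool :=
  let k := pts.length
  (List.range k).any fun i =>
    (List.range' (i+1) (k - (i+1))).any fun j =>
      (List.range' (j+1) (k - (j+1))).any fun l =>
        let a := pts.getD i ((0 : Int), (0 : Int))
        let b := pts.getD j ((0 : Int), (0 : Int))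
        let c := pts.getD l ((0 : Int), (0 : Int))
        decide ((c.2 - a.2) * (b.1 - a.1) = (b.2 - a.2) * (c.1 - a.1))

def pvSubsets : List (Int × Int) → List (List (Int × Int))
  | [] => [[]]
  | p :: ps => (pvSubsets ps).foldl (fun out s => out ++ [s, p :: s]) []

def backtracking_iterativ_alt (input : List (Int × Int)) : List (List (Int × Int)) :=
  (pvSubsets input).filter pvHasCol

-- ===== PRECONDITION & SPEC =====
-- Pre_ excludes only the empty list, on which A raises IndexError (lista[index] with lista == []).
def Pre_backtracking_iterativ (input : List (Int × Int)) : Prop := input ≠ []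
instance (input : List (Int × Int)) : Decidable (Pre_backtracking_iterativ input) := by unfold Pre_backtracking_iterativ; infer_instance
def pvWitness_backtracking_iterativ : (List (Int × Int)) := [(0, 0)]

def Spec_backtracking_iterativ (input : List (Int × Int)) (out : List (List (Int × Int))) : Prop := out = backtracking_iterativ_alt input
instance (input : List (Int × Int)) (out : List (List (Int × Int))) : Decidable (Spec_backtracking_iterativ input out) := by unfold Spec_backtracking_iterativ; infer_instance

-- ===== CLAIM (what is proved, stated in full; the proofs are below) =====
def Claim_equal_backtracking_iterativ : Prop := ∀ (input : List (Int × Int)), Dom_backtracking_iterativ input → Pre_backtracking_iterativ input → Spec_backtracking_iterativ input (backtracking_iterativ input)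

-- ===== LEMMAS AND PROOFS =====

-- collinearity of three points, as both programs test it
def pvColP (a b c : Int × Int) : Prop :=
  (c.2 - a.2) * (b.1 - a.1) = (b.2 - a.2) * (c.1 - a.1)

lemma pvColP_swap12 (a b c : Int × Int) (h : pvColP a b c) : pvColP b a c := by
  unfold pvColP at *; nlinarith [h]

lemma pvColP_swap23 (a b c : Int × Int) (h : pvColP a b c) : pvColP a c b := by
  unfold pvColP at *; nlinarith [h]

-- triple with pairwise-distinct indices, in any order, collinear
def pvTriple (s : List (Int × Int)) (i j k : Nat) : Prop :=
  i ≠ j ∧ j ≠ k ∧ i ≠ k ∧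
  pvColP (s.getD i (0, 0)) (s.getD j (0, 0)) (s.getD k (0, 0))

lemma pv_encode_lt {n i j k : Nat} (hi : i < n) (hj : j < n) (hk : k < n) :
    i * n^2 + j * n + k < n^3 := by nlinarith

lemma pv_encode_inj {n i j k i' j' k' : Nat} (hi : i < n) (hj : j < n) (hk : k < n)
    (hi' : i' < n) (hj' : j' < n) (hk' : k' < n)
    (h : i' * n^2 + j' * n + k' = i * n^2 + j * n + k) : i' = i ∧ j' = j ∧ k' = k := by
  have hn : 0 < n := by omega
  have e : ∀ a b c : Nat, a * n^2 + b * n + c = n * (n * a + b) + c := by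
    intro a b c; ring
  rw [e i' j' k', e i j k] at h
  have h1 : n * i' + j' = n * i + j ∧ k' = k := by
    constructor
    · have := congrArg (· / n) h
      simpa [Nat.mul_add_div hn, Nat.div_eq_of_lt hk, Nat.div_eq_of_lt hk'] using this
    · have := congrArg (· % n) h
      simpa [Nat.mul_add_mod, Nat.mod_eq_of_lt hk, Nat.mod_eq_of_lt hk'] using this
  have h2 : i' = i ∧ j' = j := by
    constructor
    · have := congrArg (· / n) h1.1
      simpa [Nat.mul_add_div hn, Nat.div_eq_of_lt hj, Nat.div_eq_of_lt hj'] using this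
    · have := congrArg (· % n) h1.1
      simpa [Nat.mul_add_mod, Nat.mod_eq_of_lt hj, Nat.mod_eq_of_lt hj'] using this
  exact ⟨h2.1, h2.2, h1.2⟩

-- stepping the lower bound from t to t+1 when the current triple is not a hit
lemma pv_step_iff (s : List (Int × Int)) (i j k : Nat) (hi : i < s.length)
    (hj : j < s.length) (hk : k < s.length) (hnotP : ¬ pvTriple s i j k) :
    (∃ i' j' k', i' < s.length ∧ j' < s.length ∧ k' < s.length ∧
        i * s.length^2 + j * s.length + k ≤ i' * s.length^2 + j' * s.length + k' ∧
        pvTriple s i' j' k') ↔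
    (∃ i' j' k', i' < s.length ∧ j' < s.length ∧ k' < s.length ∧
        i * s.length^2 + j * s.length + k + 1 ≤ i' * s.length^2 + j' * s.length + k' ∧
        pvTriple s i' j' k') := by
  constructor
  · rintro ⟨i', j', k', h1, h2, h3, hle, hp⟩
    rcases Nat.eq_or_lt_of_le hle with heq | hlt
    · obtain ⟨e1, e2, e3⟩ := pv_encode_inj hi hj hk h1 h2 h3 heq.symm
      exact absurd (e1 ▸ e2 ▸ e3 ▸ hp) hnotP
    · exact ⟨i', j', k', h1, h2, h3, hlt, hp⟩
  · rintro ⟨i', j', k', h1, h2, h3, hle, hp⟩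
    exact ⟨i', j', k', h1, h2, h3, Nat.le_of_succ_le hle, hp⟩

lemma pvIsSolLoop_spec (s : List (Int × Int)) :
    ∀ (fuel i j k : Nat), j < s.length → k < s.length →
    s.length^3 ≤ i * s.length^2 + j * s.length + k + fuel →
    (pvIsSolLoop s i j k fuel = true ↔
      ∃ i' j' k', i' < s.length ∧ j' < s.length ∧ k' < s.length ∧
        i * s.length^2 + j * s.length + k ≤ i' * s.length^2 + j' * s.length + k' ∧
        pvTriple s i' j' k') := by
  intro fuel
  induction fuel with
  | zero =>
    intro i j k hj hk hfuel
    simp only [pvIsSolLoop]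
    constructor
    · intro h; cases h
    · rintro ⟨i', j', k', h1, h2, h3, hle, _⟩
      have hlt := pv_encode_lt h1 h2 h3
      have : s.length^3 < s.length^3 :=
        Nat.lt_of_le_of_lt (Nat.le_trans (by omega) hle) hlt
      exact absurd this (lt_irrefl _)
  | succ fuel ih =>
    intro i j k hj hk hfuel
    by_cases hi : i < s.length
    case neg =>
      -- i ≥ length: the loop exits with False, and no valid triple lies at or above t
      simp only [pvIsSolLoop, if_neg hi]
      constructor
      · intro h; cases h
      · rintro ⟨i', j', k', h1, h2, h3, hle, _⟩
        have hlt := pv_encode_lt h1 h2 h3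
        have hbig : s.length^3 ≤ i * s.length^2 + j * s.length + k := by
          have h1' : s.length * s.length^2 ≤ i * s.length^2 :=
            Nat.mul_le_mul_right _ (by omega)
          have : s.length^3 = s.length * s.length^2 := by ring
          omega
        have : s.length^3 < s.length^3 :=
          Nat.lt_of_le_of_lt (Nat.le_trans hbig hle) hlt
        exact absurd this (lt_irrefl _)
    case pos =>
      simp only [pvIsSolLoop, if_pos hi]
      by_cases hhit :
        ((decide (i ≠ j) && decide (j ≠ k) && decide (i ≠ k)) &&
         (let a := s.getD i ((0 : Int), (0 : Int))
          let b := s.getD j ((0 : Int), (0 : Int))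
          let c := s.getD k ((0 : Int), (0 : Int))
          decide ((c.2 - a.2) * (b.1 - a.1) = (b.2 - a.2) * (c.1 - a.1)))) = true
      case pos =>
        rw [if_pos hhit]
        simp only [Bool.and_eq_true, decide_eq_true_eq] at hhit
        constructor
        · intro _
          exact ⟨i, j, k, hi, hj, hk, Nat.le_refl _,
            hhit.1.1.1, hhit.1.1.2, hhit.1.2, hhit.2⟩
        · intro _; rfl
      case neg =>
        rw [if_neg hhit]
        have hnotP : ¬ pvTriple s i j k := by
          intro hp
          exact hhit (by
            simp only [Bool.and_eq_true, decide_eq_true_eq]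
            exact ⟨⟨⟨hp.1, hp.2.1⟩, hp.2.2.1⟩, hp.2.2.2⟩)
        rw [pv_step_iff s i j k hi hj hk hnotP]
        by_cases hkc : k + 1 = s.length
        case neg =>
          -- no carry: next state (i, j, k+1)
          simp only [if_neg hkc, if_neg (by omega : ¬ j = s.length)]
          have henc : i * s.length^2 + j * s.length + (k + 1)
              = i * s.length^2 + j * s.length + k + 1 := by ring
          rw [ih i j (k+1) hj (by omega) (by omega), henc]
        case pos =>
          by_cases hjc : j + 1 = s.length
          case neg =>
            -- carry into j: next state (i, j+1, 0)
            simp only [if_pos hkc, if_neg hjc]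
            have henc : i * s.length^2 + (j + 1) * s.length + 0
                = i * s.length^2 + j * s.length + k + 1 := by
              have : s.length = k + 1 := hkc.symm
              calc i * s.length^2 + (j + 1) * s.length + 0
                  = i * s.length^2 + j * s.length + s.length := by ring
                _ = i * s.length^2 + j * s.length + k + 1 := by omega
            rw [ih i (j+1) 0 (by omega) (by omega) (by
              rw [henc]; omega), henc]
          case pos =>
            -- carry into i: next state (i+1, 0, 0)
            simp only [if_pos hkc, if_pos hjc]
            have henc : (i + 1) * s.length^2 + 0 * s.length + 0
                = i * s.length^2 + j * s.length + k + 1 := by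
              have e1 : (i + 1) * s.length^2 + 0 * s.length + 0
                  = i * s.length^2 + s.length * s.length := by ring
              have e2 : s.length * s.length = (j + 1) * s.length := by rw [hjc]
              have e3 : (j + 1) * s.length = j * s.length + s.length := by ring
              omega
            rw [ih (i+1) 0 0 (by omega) (by omega) (by rw [henc]; omega), henc]

-- A's check says: some triple of pairwise-distinct indices is collinear
lemma pvIsSol_iff (s : List (Int × Int)) :
    pvIsSol s = true ↔ ∃ i j k, i < s.length ∧ j < s.length ∧ k < s.length ∧ pvTriple s i j k := by
  unfold pvIsSol
  rcases Nat.eq_zero_or_pos s.length with h0 | hpos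
  · rw [h0]
    simp only [Nat.mul_zero, Nat.zero_mul, pvIsSolLoop]
    constructor
    · intro h; cases h
    · rintro ⟨i, j, k, hi, _⟩; omega
  · have hcube : s.length^3 ≤ 0 * s.length^2 + 0 * s.length + 0 + s.length * s.length * s.length := by
      have : s.length^3 = s.length * s.length * s.length := by ring
      omega
    rw [pvIsSolLoop_spec s (s.length * s.length * s.length) 0 0 0 hpos hpos hcube]
    simp only [Nat.zero_mul, Nat.zero_add, Nat.zero_le, true_and]

-- B's check says: some i < j < l triple is collinear
lemma pvHasCol_iff (s : List (Int × Int)) :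
    pvHasCol s = true ↔ ∃ i j l, i < j ∧ j < l ∧ l < s.length ∧
      pvColP (s.getD i (0, 0)) (s.getD j (0, 0)) (s.getD l (0, 0)) := by
  unfold pvHasCol
  simp only [List.any_eq_true, List.mem_range, List.mem_range'_1, decide_eq_true_eq]
  constructor
  · rintro ⟨i, hi, j, ⟨hj1, hj2⟩, l, ⟨hl1, hl2⟩, hcol⟩
    exact ⟨i, j, l, by omega, by omega, by omega, hcol⟩
  · rintro ⟨i, j, l, hij, hjl, hl, hcol⟩
    exact ⟨i, by omega, j, ⟨by omega, by omega⟩, l, ⟨by omega, by omega⟩, hcol⟩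

-- any pairwise-distinct collinear triple of indices can be put in increasing order
lemma pvTriple_sort (s : List (Int × Int)) (i j k : Nat) (hi : i < s.length)
    (hj : j < s.length) (hk : k < s.length) (ht : pvTriple s i j k) :
    ∃ a b c, a < b ∧ b < c ∧ c < s.length ∧
      pvColP (s.getD a (0, 0)) (s.getD b (0, 0)) (s.getD c (0, 0)) := by
  obtain ⟨hij, hjk, hik, hcol⟩ := ht
  rcases Nat.lt_or_ge i j with h1 | h1
  · rcases Nat.lt_or_ge j k with h2 | h2
    · exact ⟨i, j, k, h1, h2, hk, hcol⟩
    · rcases Nat.lt_or_ge i k with h3 | h3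
      · exact ⟨i, k, j, h3, by omega, hj, pvColP_swap23 _ _ _ hcol⟩
      · exact ⟨k, i, j, by omega, h1, hj,
          pvColP_swap12 _ _ _ (pvColP_swap23 _ _ _ hcol)⟩
  · rcases Nat.lt_or_ge i k with h2 | h2
    · exact ⟨j, i, k, by omega, h2, hk, pvColP_swap12 _ _ _ hcol⟩
    · rcases Nat.lt_or_ge j k with h3 | h3
      · exact ⟨j, k, i, h3, by omega, hi,
          pvColP_swap23 _ _ _ (pvColP_swap12 _ _ _ hcol)⟩
      · exact ⟨k, j, i, by omega, by omega, hi,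
          pvColP_swap23 _ _ _ (pvColP_swap12 _ _ _ (pvColP_swap23 _ _ _ hcol))⟩

lemma pvIsSol_eq_pvHasCol : pvIsSol = pvHasCol := by
  funext s
  cases hA : pvIsSol s <;> cases hB : pvHasCol s
  · rfl
  · obtain ⟨i, j, l, hij, hjl, hl, hcol⟩ := (pvHasCol_iff s).mp hB
    have : pvIsSol s = true := (pvIsSol_iff s).mpr
      ⟨i, j, l, by omega, by omega, hl, by omega, by omega, by omega, hcol⟩
    rw [hA] at this; cases this
  · obtain ⟨i, j, k, hi, hj, hk, ht⟩ := (pvIsSol_iff s).mp hA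
    obtain ⟨a, b, c, hab, hbc, hc, hcol⟩ := pvTriple_sort s i j k hi hj hk ht
    have : pvHasCol s = true := (pvHasCol_iff s).mpr ⟨a, b, c, hab, hbc, hc, hcol⟩
    rw [hB] at this; cases this
  · rfl

-- ---- subset enumeration ----

-- the bits of m, least significant first, padded to width n
def pvBits : Nat → Nat → List Bool
  | 0, _ => []
  | n+1, m => decide (m % 2 = 1) :: pvBits n (m / 2)

def pvSubsetOf : List Bool → List (Int × Int) → List (Int × Int)
  | _, [] => []
  | [], _ :: _ => []
  | b :: bs, x :: xs => if b then x :: pvSubsetOf bs xs else pvSubsetOf bs xs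

lemma pvBits_length (n m : Nat) : (pvBits n m).length = n := by
  induction n generalizing m with
  | zero => rfl
  | succ n ih => simp [pvBits, ih]

lemma pvBits_zero (n : Nat) : pvBits n 0 = List.replicate n false := by
  induction n with
  | zero => rfl
  | succ n ih => simp [pvBits, ih, List.replicate_succ]

lemma pvBuild_eq (lista : List Bool) (input : List (Int × Int)) (h : lista.length = input.length) :
    (List.range input.length).foldl
      (fun acc i => if lista.getD i false then acc ++ [input.getD i ((0 : Int), (0 : Int))] else acc) []
    = pvSubsetOf lista input := by
  rw [PySem.List.foldl_append_if]
  simp only [List.nil_append]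
  induction input generalizing lista with
  | nil => simp [pvSubsetOf]
  | cons x xs ih =>
    cases lista with
    | nil => simp at h
    | cons b bs =>
      simp only [List.length_cons, Nat.add_right_cancel_iff] at h
      simp only [List.length_cons]
      rw [List.range_succ_eq_map]
      simp only [List.filter_cons, List.getD_cons_zero, List.filter_map, List.map_map]
      have hcomp :
          ((List.range xs.length).filter (fun i => bs.getD i false)).map
              (fun i => xs.getD i ((0 : Int), (0 : Int)))
            = pvSubsetOf bs xs := ih bs h
      have e1 : ((fun i => (b :: bs).getD i false) ∘ Nat.succ) = fun i => bs.getD i false := by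
        funext i; simp
      have e2 : ((fun i => (x :: xs).getD i ((0 : Int), (0 : Int))) ∘ Nat.succ)
          = fun i => xs.getD i ((0 : Int), (0 : Int)) := by
        funext i; simp
      cases b <;>
        simp only [Bool.false_eq_true, if_false, if_true, List.map_cons, List.map_map] <;>
        rw [e1, e2, hcomp] <;> simp [pvSubsetOf]

lemma pvIncr_shift (x : Bool) (xs : List Bool) (i : Nat) :
    pvIncr (x :: xs) (i + 1) = ((pvIncr xs i).1.cons x, (pvIncr xs i).2) := by
  generalize hd : xs.length - i = d
  induction d generalizing xs i with
  | zero =>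
    have hle : xs.length ≤ i := by omega
    have hnone : xs[i]? = none := List.getElem?_eq_none hle
    have hg : xs.getD i false = false := by
      rw [List.getD_eq_getElem?_getD, hnone]; rfl
    rw [pvIncr, pvIncr]
    rw [dif_neg (by simp [List.getD_cons_succ, List.getD_eq_getElem?_getD, hnone]),
        dif_neg (by simp [List.getD_eq_getElem?_getD, hnone])]
    simp [List.set_cons_succ]
  | succ d ihd =>
    by_cases hg : xs.getD i false = true
    · have hlt : i < xs.length := by
        by_contra hge
        rw [List.getD_eq_getElem?_getD, List.getElem?_eq_none (by omega)] at hg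
        simp at hg
      rw [pvIncr, pvIncr]
      rw [dif_pos (by simp only [List.getD_cons_succ]; exact hg), dif_pos hg]
      simp only [List.set_cons_succ, List.length_cons, List.length_set]
      by_cases hend : i + 1 = xs.length
      · rw [if_pos (by omega), if_pos hend]
      · rw [if_neg (by omega), if_neg hend]
        exact ihd (xs.set i false) (i + 1) (by simp [List.length_set]; omega)
    · rw [pvIncr, pvIncr]
      rw [dif_neg (by simp only [List.getD_cons_succ]; exact hg), dif_neg hg]
      simp [List.set_cons_succ]

lemma pvIncr_lt (n : Nat) : ∀ m : Nat, m + 1 < 2^n →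
    pvIncr (pvBits n m) 0 = (pvBits n (m + 1), true) := by
  induction n with
  | zero => intro m hm; exact absurd hm (by simp)
  | succ n ih =>
    intro m hm
    by_cases hodd : m % 2 = 1
    · -- trailing one: clear it and carry into the tail
      have hn0 : n ≠ 0 := by
        intro h0; rw [h0] at hm; simp [Nat.pow_one] at hm; omega
      rw [pvBits, pvIncr]
      rw [dif_pos (by simp [hodd])]
      simp only [List.set_cons_zero, List.length_cons, pvBits_length]
      rw [if_neg (by omega)]
      rw [pvIncr_shift]
      have h2 : 2^(n+1) = 2 * 2^n := by rw [Nat.pow_succ]; ring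
      have harg : m / 2 + 1 < 2^n := by omega
      rw [ih (m / 2) harg]
      simp [pvBits, (by omega : (m + 1) / 2 = m / 2 + 1), (by omega : (m + 1) % 2 = 0)]
    · -- trailing zero: just set it
      rw [pvBits, pvIncr]
      rw [dif_neg (by simp [hodd])]
      simp [pvBits, (by omega : (m + 1) % 2 = 1), (by omega : (m + 1) / 2 = m / 2)]

lemma pvBits_ones (n : Nat) : pvBits n (2^n - 1) = List.replicate n true := by
  induction n with
  | zero => rfl
  | succ n ih =>
    have h2 : 2^(n+1) = 2 * 2^n := by rw [Nat.pow_succ]; ring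
    have hpos : 0 < 2^n := Nat.pow_pos (by omega)
    rw [pvBits]
    rw [(by omega : (2^(n+1) - 1) / 2 = 2^n - 1), ih]
    simp [List.replicate_succ, (by omega : (2^(n+1) - 1) % 2 = 1)]

lemma pvIncr_ones : ∀ n : Nat, 0 < n → (pvIncr (List.replicate n true) 0).2 = false := by
  intro n
  induction n with
  | zero => omega
  | succ n ih =>
    intro _
    rw [List.replicate_succ, pvIncr]
    rw [dif_pos (by simp)]
    simp only [List.set_cons_zero, List.length_cons, List.length_replicate]
    by_cases hn : n = 0
    · rw [if_pos (by omega)]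
    · rw [if_neg (by omega), pvIncr_shift]
      exact ih (by omega)

lemma pvIncr_last (n : Nat) (hn : 0 < n) :
    (pvIncr (pvBits n (2^n - 1)) 0).2 = false := by
  rw [pvBits_ones]; exact pvIncr_ones n hn

lemma pvOuter_spec (input : List (Int × Int)) (hn : 0 < input.length) :
    ∀ (c m : Nat) (acc : List (List (Int × Int))), m + c = 2^input.length →
    pvOuter input (pvBits input.length m) acc c =
      acc ++ ((List.range c).map (fun d => pvSubsetOf (pvBits input.length (m + d)) input)).filter pvIsSol := by
  intro c
  induction c with
  | zero => intro m acc _; simp [pvOuter]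
  | succ c ih =>
    intro m acc hm
    rw [pvOuter]
    simp only [pvBuild_eq (pvBits input.length m) input (pvBits_length _ _)]
    rcases Nat.eq_zero_or_pos c with hc0 | hcpos
    · -- last subset: the counter overflows and the loop stops
      subst hc0
      have hlast : m = 2^input.length - 1 := by omega
      have hsnd : (pvIncr (pvBits input.length m) 0).2 = false := by
        rw [hlast]; exact pvIncr_last input.length hn
      rw [if_neg (by rw [hsnd]; simp)]
      simp only [Nat.zero_add, List.range_one, List.map_cons, List.map_nil, List.filter]
      cases hsol : pvIsSol (pvSubsetOf (pvBits input.length (m + 0)) input) <;>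
        simp only [Nat.add_zero] at hsol <;> simp [hsol]
    · -- counter steps from m to m + 1
      have hstep : pvIncr (pvBits input.length m) 0 = (pvBits input.length (m + 1), true) :=
        pvIncr_lt input.length m (by omega)
      rw [hstep]
      simp only [if_pos]
      rw [ih (m + 1) _ (by omega)]
      rw [List.range_succ_eq_map]
      simp only [List.map_cons, List.map_map, Nat.add_zero, List.filter_cons]
      have e1 : ((fun d => pvSubsetOf (pvBits input.length (m + d)) input) ∘ Nat.succ)
          = fun d => pvSubsetOf (pvBits input.length (m + 1 + d)) input := by
        funext d
        have : m + (d + 1) = m + 1 + d := by omega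
        simp [Nat.succ_eq_add_one, this]
      rw [e1]
      cases hsol : pvIsSol (pvSubsetOf (pvBits input.length m) input) <;> simp [hsol]

lemma pvRange_double {α : Type} (f : Nat → α) (t : Nat) :
    (List.range (2 * t)).map f = (List.range t).flatMap (fun q => [f (2 * q), f (2 * q + 1)]) := by
  induction t with
  | zero => rfl
  | succ t ih =>
    have h2 : 2 * (t + 1) = (2 * t + 1) + 1 := by omega
    rw [h2, List.range_succ, List.range_succ, List.map_append, List.map_append, ih,
      List.range_succ, List.flatMap_append]
    simp

lemma pvSubsets_eq (input : List (Int × Int)) :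
    pvSubsets input = (List.range (2^input.length)).map (fun m => pvSubsetOf (pvBits input.length m) input) := by
  induction input with
  | nil => simp [pvSubsets, pvSubsetOf]
  | cons p ps ih =>
    rw [pvSubsets, PySem.List.foldl_append_eq_flatMap, List.nil_append, ih]
    have h2 : 2^(p :: ps).length = 2 * 2^ps.length := by
      simp only [List.length_cons, Nat.pow_succ]; ring
    rw [h2, pvRange_double, List.flatMap_map]
    congr 1
    funext q
    have ea : (2 * q) % 2 = 0 := by omega
    have eb : (2 * q) / 2 = q := by omega
    have ec : (2 * q + 1) % 2 = 1 := by omega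
    have ed : (2 * q + 1) / 2 = q := by omega
    simp [pvBits, pvSubsetOf, ea, eb, ec, ed]


-- ===== VERDICT (by name: the statement is the Claim_ definition above) =====
theorem backtracking_iterativ_spec : Claim_equal_backtracking_iterativ := by
  intro input _ hpre
  unfold Spec_backtracking_iterativ
  have hn : 0 < input.length := List.length_pos_of_ne_nil hpre
  have h1 : backtracking_iterativ input =
      ((List.range (2^input.length)).map (fun d => pvSubsetOf (pvBits input.length (0 + d)) input)).filter pvIsSol := by
    rw [backtracking_iterativ, ← pvBits_zero, pvOuter_spec input hn (2^input.length) 0 [] (by omega)]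
    simp
  rw [h1, backtracking_iterativ_alt, pvSubsets_eq, pvIsSol_eq_pvHasCol]
  simp
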